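-- pv_equiv track=rewrite | github.com/sourabhsharmaaa/app-review-insights-analyser | phase3/theme_grouper.py | _closest_theme
-- ===== SOURCE A (Python) =====
-- from typing import Dict, List
--
-- def _closest_theme(label: str, themes: List[str]) -> str:
--     """Fuzzy-match an unrecognised label to the nearest theme."""
--     label_lower = label.lower()
--     for t in themes:
--         if t.lower() == label_lower:
--             return t
--     for t in themes:
--         if label_lower in t.lower() or t.lower() in label_lower:
--             return t
--     return themes[0]
-- ===== SOURCE B (Python) =====
-- def _closest_theme(label, themes):
--     """Single pass: return on exact match, remember first substring match as fallback."""
--     label_lower = label.lower()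
--     fallback = None
--     for t in themes:
--         tl = t.lower()
--         if tl == label_lower:
--             return t
--         if fallback is None and (label_lower in tl or tl in label_lower):
--             fallback = t
--     return fallback if fallback is not None else themes[0]
-- ===== Notes on version B (the rewrite author's own statement) =====
-- stated objective: simpler
-- what changed: The two sequential scans over themes (exact-match pass, then substring pass) are fused into one pass that returns immediately on an exact match and records the first substring match in a fallback variable.
import Mathlib
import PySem

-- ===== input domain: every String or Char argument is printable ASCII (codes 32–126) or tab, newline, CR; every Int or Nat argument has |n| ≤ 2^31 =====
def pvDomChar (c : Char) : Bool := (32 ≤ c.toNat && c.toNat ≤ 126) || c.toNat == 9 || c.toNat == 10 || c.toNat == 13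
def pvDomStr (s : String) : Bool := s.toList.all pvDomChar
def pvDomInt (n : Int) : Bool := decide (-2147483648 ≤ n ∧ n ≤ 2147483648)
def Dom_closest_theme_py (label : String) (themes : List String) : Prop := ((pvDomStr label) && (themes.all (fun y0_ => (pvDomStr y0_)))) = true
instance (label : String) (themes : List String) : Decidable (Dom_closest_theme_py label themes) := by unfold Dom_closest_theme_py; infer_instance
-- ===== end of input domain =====

-- ===== PORT A =====
-- B fuses A's two scans into one pass with a fallback variable: simpler, one traversal instead of two.
def ctA_exact (ll : String) : List String → Option String
  | [] => none
  | t :: ts => if PySem.Str.lower t = ll then some t else ctA_exact ll ts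

def ctA_sub (ll : String) : List String → Option String
  | [] => none
  | t :: ts =>
    if PySem.Str.isIn ll (PySem.Str.lower t) || PySem.Str.isIn (PySem.Str.lower t) ll then some t
    else ctA_sub ll ts

def closest_theme_py (label : String) (themes : List String) : String :=
  let label_lower := PySem.Str.lower label
  match ctA_exact label_lower themes with
  | some t => t
  | none =>
    match ctA_sub label_lower themes with
    | some t => t
    | none => (PySem.List.pyGet? themes 0).getD ""   -- themes[0]; Pre_ excludes the empty list (IndexError)

-- ===== PORT B =====
def ctB_go (ll : String) : List String → Option String → Option String
  | [], fb => fb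
  | t :: ts, fb =>
    let tl := PySem.Str.lower t
    if tl = ll then some t
    else ctB_go ll ts
      (if fb.isNone && (PySem.Str.isIn ll tl || PySem.Str.isIn tl ll) then some t else fb)

def closest_theme_py_alt (label : String) (themes : List String) : String :=
  let label_lower := PySem.Str.lower label
  match ctB_go label_lower themes none with
  | some t => t
  | none => (PySem.List.pyGet? themes 0).getD ""   -- themes[0]; Pre_ excludes the empty list (IndexError)

-- ===== PRECONDITION & SPEC =====
-- A (and B) raise IndexError on themes = [] via themes[0]; Pre_ excludes exactly that.
def Pre_closest_theme_py (label : String) (themes : List String) : Prop := themes ≠ []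
instance (label : String) (themes : List String) : Decidable (Pre_closest_theme_py label themes) := by unfold Pre_closest_theme_py; infer_instance
def pvWitness_closest_theme_py : String × List String := ("crash", ["Crashes", "UI"])

def Spec_closest_theme_py (label : String) (themes : List String) (out : String) : Prop := out = closest_theme_py_alt label themes
instance (label : String) (themes : List String) (out : String) : Decidable (Spec_closest_theme_py label themes out) := by unfold Spec_closest_theme_py; infer_instance

-- ===== CLAIM (what is proved, stated in full; the proofs are below) =====
def Claim_equal_closest_theme_py : Prop := ∀ (label : String) (themes : List String), Dom_closest_theme_py label themes → Pre_closest_theme_py label themes → Spec_closest_theme_py label themes (closest_theme_py label themes)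

-- ===== LEMMAS AND PROOFS =====
-- B's single loop equals: first exact match, else the incoming fallback, else first substring match.
theorem ctB_go_eq (ll : String) : ∀ (ts : List String) (fb : Option String),
    ctB_go ll ts fb =
      match ctA_exact ll ts with
      | some t => some t
      | none =>
        match fb with
        | some f => some f
        | none => ctA_sub ll ts := by
  intro ts
  induction ts with
  | nil => intro fb; cases fb <;> simp [ctB_go, ctA_exact, ctA_sub]
  | cons t ts ih =>
    intro fb
    simp only [ctB_go, ctA_exact, ctA_sub]
    by_cases hx : PySem.Str.lower t = ll
    · simp [hx]
    · simp only [if_neg hx, ih]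
      cases fb with
      | some f => cases ctA_exact ll ts <;> rfl
      | none =>
        simp only [Option.isNone_none, Bool.true_and]
        cases ctA_exact ll ts <;> split_ifs <;> rfl

-- ===== VERDICT (by name: the statement is the Claim_ definition above) =====
theorem closest_theme_py_spec : Claim_equal_closest_theme_py := by
  intro label themes _ _
  unfold Spec_closest_theme_py closest_theme_py closest_theme_py_alt
  simp only [ctB_go_eq]
  cases ctA_exact (PySem.Str.lower label) themes <;> simp
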